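-- pv_equiv track=rewrite | github.com/florisvb/Nonlinear_and_Data_Driven_Estimation | Utility/plot_utility.py | find_contiguous_chunks
-- ===== SOURCE A (Python) =====
-- def find_contiguous_chunks(lst):
--     """
--     Find contiguous chunks in a list of integers.
--
--     Parameters:
--     -----------
--     lst : list of int
--         List of integers
--
--     Returns:
--     --------
--     list of lists : Each sublist contains a contiguous sequence
--     """
--     if not lst:
--         return []
--
--     lst = sorted(lst)
--     chunks = []
--     current_chunk = [lst[0]]
--
--     for i in range(1, len(lst)):
--         if lst[i] == lst[i-1] + 1:
--             current_chunk.append(lst[i])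
--         else:
--             chunks.append(current_chunk)
--             current_chunk = [lst[i]]
--
--     chunks.append(current_chunk)
--     return chunks
-- ===== SOURCE B (Python) =====
-- def find_contiguous_chunks(lst):
--     """Key-transform then partition: after sorting, two elements belong to the
--     same contiguous run iff value-minus-position is equal; compute those keys,
--     collect the boundary positions where the key changes, and slice the sorted
--     list at consecutive boundaries."""
--     s = sorted(lst)
--     keys = [x - i for i, x in enumerate(s)]
--     cuts = [i for i in range(len(s)) if i == 0 or keys[i] != keys[i - 1]] + [len(s)]
--     return [s[a:b] for a, b in zip(cuts, cuts[1:])]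
-- ===== Notes on version B (the rewrite author's own statement) =====
-- stated objective: alternative
-- what changed: Replaces A's single-pass current-chunk accumulator with a key-transform-then-partition strategy: compute keys x - i over the sorted list, collect the boundary indices where the key changes in a comprehension, and slice the sorted list at consecutive boundaries.
import Mathlib
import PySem

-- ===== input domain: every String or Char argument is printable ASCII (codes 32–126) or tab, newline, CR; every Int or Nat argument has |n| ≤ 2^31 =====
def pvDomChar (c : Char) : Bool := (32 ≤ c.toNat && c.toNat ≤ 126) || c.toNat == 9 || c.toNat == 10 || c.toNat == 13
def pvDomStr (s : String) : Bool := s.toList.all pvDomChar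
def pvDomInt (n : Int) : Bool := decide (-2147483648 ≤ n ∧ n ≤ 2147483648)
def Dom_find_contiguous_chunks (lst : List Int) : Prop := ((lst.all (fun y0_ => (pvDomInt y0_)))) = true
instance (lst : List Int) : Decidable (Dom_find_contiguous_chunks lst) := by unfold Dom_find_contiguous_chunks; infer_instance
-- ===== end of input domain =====

-- B groups the sorted list by the key x - i (value minus sorted position): it collects the
-- boundary indices where that key changes and slices the sorted list at consecutive boundaries,
-- instead of A's single pass with a current-chunk accumulator. Same return value, proved below.


-- ===== PORT A =====
-- A's for-loop over range(1, len(lst)) compares lst[i] with lst[i-1]: rendered as the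
-- obvious structural recursion over the tail of the sorted list carrying prev = lst[i-1]
-- together with the loop state (chunks, current_chunk).
def pvLoopA : List Int → Int → List (List Int) → List Int → List (List Int)
  | [], _, chunks, current => chunks ++ [current]
  | x :: rest, prev, chunks, current =>
      if x = prev + 1 then pvLoopA rest x chunks (current ++ [x])
      else pvLoopA rest x (chunks ++ [current]) [x]

def find_contiguous_chunks (lst : List Int) : List (List Int) :=
  if lst = [] then []
  else
    match PySem.List.sorted lst (fun x => x) false with
    | [] => []
    | x :: t => pvLoopA t x [] [x]

-- ===== PORT B =====
-- Source B: s = sorted(lst); keys = [x - i for i, x in enumerate(s)];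
-- cuts = [i for i in range(len(s)) if i == 0 or keys[i] != keys[i-1]] + [len(s)];
-- return [s[a:b] for a, b in zip(cuts, cuts[1:])]
def find_contiguous_chunks_alt (lst : List Int) : List (List Int) :=
  let s := PySem.List.sorted lst (fun x => x) false
  let keys := (PySem.List.enumerate s 0).map (fun p => p.2 - p.1)
  let cuts := ((PySem.List.pyRange 0 (s.length : Int) 1).filter
      (fun i => i == 0 || !(PySem.List.pyGet? keys i == PySem.List.pyGet? keys (i - 1))))
    ++ [(s.length : Int)]
  (cuts.zip (cuts.drop 1)).map (fun p => PySem.List.slice s (some p.1) (some p.2))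

-- ===== PRECONDITION & SPEC =====
def Spec_find_contiguous_chunks (lst : List Int) (out : List (List Int)) : Prop := out = find_contiguous_chunks_alt lst
instance (lst : List Int) (out : List (List Int)) : Decidable (Spec_find_contiguous_chunks lst out) := by unfold Spec_find_contiguous_chunks; infer_instance

-- ===== CLAIM (what is proved, stated in full; the proofs are below) =====
def Claim_equal_find_contiguous_chunks : Prop := ∀ (lst : List Int), Dom_find_contiguous_chunks lst → Spec_find_contiguous_chunks lst (find_contiguous_chunks lst)

-- ===== LEMMAS AND PROOFS =====

-- Reference recursion: chunking a list front-to-back by prepending (proof device only).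
def pvStep (chunks : List (List Int)) (x : Int) : List (List Int) :=
  match chunks with
  | (y :: c) :: rs => if y = x + 1 then (x :: y :: c) :: rs else [x] :: (y :: c) :: rs
  | _ => [x] :: chunks

def pvGo : List Int → List (List Int)
  | [] => []
  | x :: t => pvStep (pvGo t) x

-- Length of the initial contiguous run of t continuing from x, and run-peeling chunking.
def pvRunLen : Int → List Int → Nat
  | _, [] => 0
  | x, y :: t => if y = x + 1 then pvRunLen y t + 1 else 0

lemma pvRunLen_le (x : Int) (t : List Int) : pvRunLen x t ≤ t.length := by
  induction t generalizing x with
  | nil => simp [pvRunLen]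
  | cons y t ih =>
    simp only [pvRunLen]
    split_ifs
    · have := ih y; simp; omega
    · simp

def pvChunks : List Int → List (List Int)
  | [] => []
  | x :: t => (x :: t.take (pvRunLen x t)) :: pvChunks (t.drop (pvRunLen x t))
termination_by s => s.length
decreasing_by
  simp

-- Boundary predicate and boundary indices of a list (Nat level, proof device).
def pvCutP (s : List Int) (j : Nat) : Bool :=
  decide (j = 0) || decide (s.getD j 0 ≠ s.getD (j - 1) 0 + 1)

def pvCutsN (s : List Int) : List Nat := (List.range s.length).filter (pvCutP s)

def pvSliceAt (s : List Int) (cs : List Nat) : List (List Int) :=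
  (((cs ++ [s.length]).zip ((cs ++ [s.length]).drop 1))).map
    (fun p => (s.drop p.1).take (p.2 - p.1))

lemma pvGo_shape (x : Int) (t : List Int) : ∃ d rs, pvGo (x :: t) = (x :: d) :: rs := by
  cases h : pvGo t with
  | nil => exact ⟨[], [], by simp [pvGo, pvStep, h]⟩
  | cons c rs =>
    cases c with
    | nil => exact ⟨[], [] :: rs, by simp [pvGo, pvStep, h]⟩
    | cons y cc =>
      by_cases hy : y = x + 1
      · exact ⟨y :: cc, rs, by simp [pvGo, pvStep, h, hy]⟩
      · exact ⟨[], (y :: cc) :: rs, by simp [pvGo, pvStep, h, hy]⟩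

lemma pvLoopA_eq : ∀ (t : List Int) (prev : Int) (chunks : List (List Int)) (cur d : List Int)
    (rs : List (List Int)), pvGo (prev :: t) = (prev :: d) :: rs →
    pvLoopA t prev chunks cur = chunks ++ (cur ++ d) :: rs := by
  intro t
  induction t with
  | nil =>
    intro prev chunks cur d rs h
    simp [pvGo, pvStep] at h
    obtain ⟨hd, hrs⟩ := h
    simp [pvLoopA, ← hd, hrs]
  | cons x t' ih =>
    intro prev chunks cur d rs h
    obtain ⟨d', rs', h'⟩ := pvGo_shape x t'
    by_cases hx : x = prev + 1
    · have hpg : pvGo (prev :: x :: t') = (prev :: x :: d') :: rs' := by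
        show pvStep (pvGo (x :: t')) prev = _
        rw [h']; simp [pvStep, hx]
      rw [hpg] at h
      simp only [List.cons.injEq, true_and] at h
      obtain ⟨hd, hrs⟩ := h
      simp only [pvLoopA, if_pos hx]
      rw [ih x chunks (cur ++ [x]) d' rs' h', ← hd, hrs]
      simp
    · have hpg : pvGo (prev :: x :: t') = [prev] :: (x :: d') :: rs' := by
        show pvStep (pvGo (x :: t')) prev = _
        rw [h']; simp [pvStep, hx]
      rw [hpg] at h
      simp only [List.cons.injEq, true_and] at h
      obtain ⟨hd, hrs⟩ := h
      simp only [pvLoopA, if_neg hx]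
      rw [ih x (chunks ++ [cur]) [x] d' rs' h', ← hd, ← hrs]
      simp

lemma A_eq_pvGo (lst : List Int) :
    find_contiguous_chunks lst = pvGo (PySem.List.sorted lst (fun x => x) false) := by
  unfold find_contiguous_chunks
  by_cases hl : lst = []
  · subst hl; rfl
  · rw [if_neg hl]
    cases h : PySem.List.sorted lst (fun x => x) false with
    | nil => simp [pvGo]
    | cons x t =>
      obtain ⟨d, rs, hs⟩ := pvGo_shape x t
      show pvLoopA t x [] [x] = pvGo (x :: t)
      rw [pvLoopA_eq t x [] [x] d rs hs, hs]
      simp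

lemma getD_drop (s : List Int) (r i : Nat) (h : r + i < s.length) :
    (s.drop r).getD i 0 = s.getD (r + i) 0 := by
  have h1 : i < (s.drop r).length := by simp; omega
  rw [List.getD_eq_getElem _ _ h1, List.getD_eq_getElem _ _ h, List.getElem_drop]

lemma pvGo_eq_pvChunks : ∀ s : List Int, pvGo s = pvChunks s := by
  intro s
  induction s with
  | nil => simp [pvGo, pvChunks]
  | cons x t ih =>
    cases t with
    | nil => simp [pvGo, pvStep, pvChunks, pvRunLen]
    | cons y t' =>
      by_cases hy : y = x + 1
      · have h1 : pvChunks (y :: t') =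
            (y :: t'.take (pvRunLen y t')) :: pvChunks (t'.drop (pvRunLen y t')) := by
          rw [pvChunks]
        have h2 : pvChunks (x :: y :: t') =
            (x :: y :: t'.take (pvRunLen y t')) :: pvChunks (t'.drop (pvRunLen y t')) := by
          rw [pvChunks]; simp [pvRunLen, hy]
        show pvStep (pvGo (y :: t')) x = _
        rw [ih, h1, h2]
        simp [pvStep, hy]
      · have h2 : pvChunks (x :: y :: t') = [x] :: pvChunks (y :: t') := by
          rw [pvChunks]; simp [pvRunLen, hy]
        show pvStep (pvGo (y :: t')) x = _
        rw [ih, h2]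
        conv_lhs => rw [pvChunks]
        conv_rhs => rw [pvChunks]
        simp [pvStep, hy]

-- run property: within the initial run, adjacent elements differ by one
lemma pvRun_adj : ∀ (t : List Int) (x : Int) (j : Nat), 1 ≤ j → j ≤ pvRunLen x t →
    (x :: t).getD j 0 = (x :: t).getD (j - 1) 0 + 1 := by
  intro t
  induction t with
  | nil => intro x j h1 h2; simp [pvRunLen] at h2; omega
  | cons y t' ih =>
    intro x j h1 h2
    by_cases hy : y = x + 1
    · match j, h1 with
      | 1, _ => simp [hy]
      | (j' + 2), _ =>
        have h2' : j' + 1 ≤ pvRunLen y t' := by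
          simp only [pvRunLen, if_pos hy] at h2; omega
        have := ih y (j' + 1) (by omega) h2'
        simpa using this
    · simp [pvRunLen, hy] at h2; omega

-- break property: just after the run, adjacency fails
lemma pvRun_break : ∀ (t : List Int) (x : Int), pvRunLen x t < t.length →
    t.getD (pvRunLen x t) 0 ≠ (x :: t).getD (pvRunLen x t) 0 + 1 := by
  intro t
  induction t with
  | nil => intro x h; simp at h
  | cons y t' ih =>
    intro x h
    by_cases hy : y = x + 1
    · simp only [pvRunLen, if_pos hy] at h ⊢
      have := ih y (by simpa using h)
      simpa using this
    · simp [pvRunLen, hy]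

lemma pvCutsN_head (d : List Int) (hd : d ≠ []) : ∃ rest, pvCutsN d = 0 :: rest := by
  cases d with
  | nil => simp at hd
  | cons y d' =>
    refine ⟨((List.range d'.length).map Nat.succ).filter (pvCutP (y :: d')), ?_⟩
    unfold pvCutsN
    have hl : (y :: d').length = d'.length + 1 := by simp
    rw [hl, List.range_succ_eq_map, List.filter_cons_of_pos (by simp [pvCutP])]

lemma pvCutsN_cons (x : Int) (t : List Int) :
    pvCutsN (x :: t) =
      0 :: (pvCutsN ((x :: t).drop (pvRunLen x t + 1))).map (· + (pvRunLen x t + 1)) := by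
  have hkle := pvRunLen_le x t
  set k := pvRunLen x t with hk
  have hdrop : (x :: t).drop (k + 1) = t.drop k := by simp
  have hdl : (t.drop k).length = t.length - k := by simp
  have hlen : (x :: t).length = (k + 1) + (t.drop k).length := by simp; omega
  unfold pvCutsN
  rw [hlen, List.range_add, List.filter_append]
  have hfirst : (List.range (k + 1)).filter (pvCutP (x :: t)) = [0] := by
    rw [List.range_succ_eq_map, List.filter_cons_of_pos (by simp [pvCutP])]
    rw [List.filter_eq_nil_iff.mpr ?_]
    intro j hj
    simp only [List.mem_map, List.mem_range] at hj
    obtain ⟨j', hj', rfl⟩ := hj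
    have hadj := pvRun_adj t x (j' + 1) (by omega) (by omega)
    simp [pvCutP, Nat.succ_eq_add_one]
    simpa using hadj
  rw [hfirst, List.filter_map]
  have hcong : ∀ j ∈ List.range (t.drop k).length,
      (pvCutP (x :: t) ∘ ((k + 1) + ·)) j = pvCutP ((x :: t).drop (k + 1)) j := by
    intro j hj
    simp only [List.mem_range] at hj
    rw [hdrop]
    rcases Nat.eq_zero_or_pos j with hj0 | hj1
    · subst hj0
      have hklen : k < t.length := by omega
      have hbreak := pvRun_break t x (by omega)
      have e1 : (x :: t).getD ((k + 1) + 0) 0 = t.getD k 0 := by simp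
      have e2 : (x :: t).getD ((k + 1) + 0 - 1) 0 = (x :: t).getD k 0 := by
        congr 1
      simp only [Function.comp, pvCutP, e1, e2]
      simp
      simpa using hbreak
    · have hj' : j - 1 < (t.drop k).length := by omega
      have e1 : (x :: t).getD ((k + 1) + j) 0 = (t.drop k).getD j 0 := by
        rw [show ((k+1)+j) = (k+1)+j from rfl]
        rw [← getD_drop (x :: t) (k+1) j (by rw [hlen]; omega), hdrop]
      have e2 : (x :: t).getD ((k + 1) + j - 1) 0 = (t.drop k).getD (j - 1) 0 := by
        have : (k + 1) + j - 1 = (k + 1) + (j - 1) := by omega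
        rw [this, ← getD_drop (x :: t) (k+1) (j-1) (by rw [hlen]; omega), hdrop]
      simp only [Function.comp, pvCutP, e1, e2]
      have hjne : ¬ (j = 0) := by omega
      simp [hjne]
  rw [List.filter_congr hcong]
  rw [hdrop]
  simp [Nat.add_comm]

lemma pvSliceAt_cuts : ∀ s : List Int, pvSliceAt s (pvCutsN s) = pvChunks s := by
  intro s
  induction s using pvChunks.induct with
  | case1 => simp [pvSliceAt, pvCutsN, pvChunks]
  | case2 x t ih =>
    have hkle := pvRunLen_le x t
    set k := pvRunLen x t with hk
    set d := t.drop k with hd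
    have hdrop : (x :: t).drop (k + 1) = d := by simp [hd]
    have hM : ∃ M', pvCutsN d ++ [d.length] = 0 :: M' := by
      by_cases hd0 : d = []
      · exact ⟨[], by simp [hd0, pvCutsN]⟩
      · obtain ⟨rest, hr⟩ := pvCutsN_head d hd0
        exact ⟨rest ++ [d.length], by simp [hr]⟩
    obtain ⟨M', hM⟩ := hM
    have hlen : (x :: t).length = d.length + (k + 1) := by simp [hd]; omega
    rw [pvCutsN_cons, hdrop]
    unfold pvSliceAt
    rw [hlen]
    have hL : (0 :: (pvCutsN d).map (· + (k + 1))) ++ [d.length + (k + 1)] =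
        0 :: ((pvCutsN d ++ [d.length]).map (· + (k + 1))) := by simp
    rw [hL, hM]
    have hzip : (0 :: ((0 :: M').map (· + (k + 1)))).zip
          ((0 :: ((0 :: M').map (· + (k + 1)))).drop 1) =
        (0, k + 1) :: (((0 :: M').zip ((0 :: M').drop 1)).map
          (Prod.map (· + (k + 1)) (· + (k + 1)))) := by
      simp only [List.drop_one, List.tail_cons]
      rw [show List.map (fun x => x + (k + 1)) (0 :: M') =
          (k + 1) :: List.map (fun x => x + (k + 1)) M' from by simp]
      rw [List.zip_cons_cons]
      congr 1
      rw [show ((k + 1) : Nat) :: List.map (fun x => x + (k + 1)) M' =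
          List.map (fun x => x + (k + 1)) (0 :: M') from by simp]
      rw [List.zip_map]
    rw [hzip]
    rw [List.map_cons, List.map_map]
    have hhead : ((x :: t).drop (0 : Nat)).take ((k + 1) - 0) = x :: t.take k := by simp
    have htail : ((fun p : Nat × Nat => ((x :: t).drop p.1).take (p.2 - p.1)) ∘
          Prod.map (· + (k + 1)) (· + (k + 1))) =
        (fun p : Nat × Nat => (d.drop p.1).take (p.2 - p.1)) := by
      funext p
      simp only [Function.comp, Prod.map]
      have e1 : (x :: t).drop (p.1 + (k + 1)) = d.drop p.1 := by
        rw [hd, List.drop_drop]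
        rw [show p.1 + (k + 1) = k + p.1 + 1 from by omega]
        rw [List.drop_succ_cons]
      have e2 : p.2 + (k + 1) - (p.1 + (k + 1)) = p.2 - p.1 := by omega
      rw [e1, e2]
    rw [htail, hhead]
    have hrhs : pvChunks (x :: t) = (x :: t.take k) :: pvChunks d := by
      rw [pvChunks]
    rw [hrhs]
    congr 1
    have := ih
    unfold pvSliceAt at this
    rw [hM] at this
    exact this

lemma B_cuts (s : List Int) :
    (PySem.List.pyRange 0 (s.length : Int) 1).filter
      (fun i => i == 0 ||
        !(PySem.List.pyGet? ((PySem.List.enumerate s 0).map (fun p => p.2 - p.1)) i ==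
          PySem.List.pyGet? ((PySem.List.enumerate s 0).map (fun p => p.2 - p.1)) (i - 1))) =
      (pvCutsN s).map (Nat.cast) := by
  rw [PySem.List.pyRange_zero_nat, List.filter_map]
  unfold pvCutsN
  congr 1
  apply List.filter_congr
  intro j hj
  simp only [List.mem_range] at hj
  have hkey : ∀ m : Nat, m < s.length →
      PySem.List.pyGet? ((PySem.List.enumerate s 0).map (fun p => p.2 - p.1)) (m : Int) =
        some (s.getD m 0 - (m : Int)) := by
    intro m hm
    rw [PySem.List.pyGet?_natCast, List.getElem?_map, PySem.List.getElem?_enumerate]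
    rw [List.getElem?_eq_getElem hm, List.getD_eq_getElem _ _ hm]
    simp
  rcases Nat.eq_zero_or_pos j with hj0 | hj1
  · subst hj0; simp [pvCutP]
  · have hc : ((j : Int) - 1) = ((j - 1 : Nat) : Int) := by omega
    simp only [Function.comp]
    rw [hc, hkey j hj, hkey (j - 1) (by omega)]
    have h0 : (((j : Nat) : Int) == 0) = false := by
      simp; omega
    simp only [h0, Bool.false_or, pvCutP, Option.some_beq_some]
    have hjne : decide (j = 0) = false := by simp; omega
    rw [hjne, Bool.false_or]
    have hiff : (s.getD j 0 - (j : Int) = s.getD (j - 1) 0 - ((j - 1 : Nat) : Int)) ↔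
        (s.getD j 0 = s.getD (j - 1) 0 + 1) := by omega
    show (!((s.getD j 0 - (j : Int)) == (s.getD (j - 1) 0 - ((j - 1 : Nat) : Int)))) =
      decide (s.getD j 0 ≠ s.getD (j - 1) 0 + 1)
    by_cases hcase : s.getD j 0 = s.getD (j - 1) 0 + 1
    · have h1 := hiff.mpr hcase
      simp only [List.getD_eq_getElem?_getD] at h1 hcase
      simp [hcase]
      omega
    · have h1 := (not_congr hiff).mpr hcase
      simp only [List.getD_eq_getElem?_getD] at h1 hcase
      simp [h1, hcase]

lemma B_eq_pvChunks (lst : List Int) :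
    find_contiguous_chunks_alt lst = pvChunks (PySem.List.sorted lst (fun x => x) false) := by
  set s := PySem.List.sorted lst (fun x => x) false with hs
  show ((((PySem.List.pyRange 0 (s.length : Int) 1).filter
      (fun i => i == 0 || !(PySem.List.pyGet? ((PySem.List.enumerate s 0).map (fun p => p.2 - p.1)) i ==
        PySem.List.pyGet? ((PySem.List.enumerate s 0).map (fun p => p.2 - p.1)) (i - 1))))
    ++ [(s.length : Int)]).zip ((((PySem.List.pyRange 0 (s.length : Int) 1).filter
      (fun i => i == 0 || !(PySem.List.pyGet? ((PySem.List.enumerate s 0).map (fun p => p.2 - p.1)) i ==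
        PySem.List.pyGet? ((PySem.List.enumerate s 0).map (fun p => p.2 - p.1)) (i - 1))))
    ++ [(s.length : Int)]).drop 1)).map (fun p => PySem.List.slice s (some p.1) (some p.2)) = pvChunks s
  rw [B_cuts s]
  rw [← pvSliceAt_cuts s]
  unfold pvSliceAt
  have hcast : (pvCutsN s).map (Nat.cast : Nat → Int) ++ [(s.length : Int)] =
      (pvCutsN s ++ [s.length]).map (Nat.cast) := by simp
  rw [hcast, ← List.map_drop, List.zip_map, List.map_map]
  apply List.map_congr_left
  intro p _
  simp only [Function.comp, Prod.map]
  exact PySem.List.slice_natCast s p.1 p.2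

-- ===== VERDICT (by name: the statement is the Claim_ definition above) =====
theorem find_contiguous_chunks_spec : Claim_equal_find_contiguous_chunks := by
  intro lst _
  unfold Spec_find_contiguous_chunks
  rw [A_eq_pvGo, pvGo_eq_pvChunks, B_eq_pvChunks]
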